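-- pv_equiv track=rewrite | github.com/liujinbf/gjs | macro_news_feed.py | _infer_symbols
-- ===== SOURCE A (Python) =====
-- GLOBAL_SYMBOLS = {"XAUUSD", "XAGUSD", "EURUSD", "USDJPY"}
--
-- SYMBOL_KEYWORDS = {
--     "XAUUSD": {"gold", "bullion", "fomc", "federal reserve", "powell", "cpi", "pce", "inflation", "yield", "treasury"},
--     "XAGUSD": {"silver", "bullion", "fomc", "federal reserve", "powell", "cpi", "pce", "inflation", "yield"},
--     "EURUSD": {"ecb", "lagarde", "euro area", "eurozone", "euro", "federal reserve", "powell", "dollar", "cpi", "pce"},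
--     "USDJPY": {"boj", "bank of japan", "ueda", "yen", "japan", "treasury", "yield", "federal reserve", "powell"},
-- }
--
-- def _normalize_text(value: object) -> str:
--     return " ".join(str(value or "").replace("\n", " ").split()).strip()
--
-- def _infer_symbols(title: str, summary: str, watch_symbols: list[str] | None = None) -> list[str]:
--     text = f"{_normalize_text(title)} {_normalize_text(summary)}".lower()
--     matched = []
--     target_symbols = [str(item or "").strip().upper() for item in list(watch_symbols or []) if str(item or "").strip()]
--     candidates = target_symbols or sorted(GLOBAL_SYMBOLS)
--     for symbol in candidates:
--         keywords = SYMBOL_KEYWORDS.get(symbol, set())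
--         if any(keyword in text for keyword in keywords):
--             matched.append(symbol)
--     return matched
-- ===== SOURCE B (Python) =====
-- GLOBAL_SYMBOLS = {"XAUUSD", "XAGUSD", "EURUSD", "USDJPY"}
--
-- SYMBOL_KEYWORDS = {
--     "XAUUSD": {"gold", "bullion", "fomc", "federal reserve", "powell", "cpi", "pce", "inflation", "yield", "treasury"},
--     "XAGUSD": {"silver", "bullion", "fomc", "federal reserve", "powell", "cpi", "pce", "inflation", "yield"},
--     "EURUSD": {"ecb", "lagarde", "euro area", "eurozone", "euro", "federal reserve", "powell", "dollar", "cpi", "pce"},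
--     "USDJPY": {"boj", "bank of japan", "ueda", "yen", "japan", "treasury", "yield", "federal reserve", "powell"},
-- }
--
-- # Inverted index: keyword -> set of symbols that list it (built once at import).
-- KEYWORD_TO_SYMBOLS: dict[str, set] = {}
-- for _symbol, _kws in SYMBOL_KEYWORDS.items():
--     for _kw in _kws:
--         KEYWORD_TO_SYMBOLS.setdefault(_kw, set()).add(_symbol)
--
-- def _normalize_text(value: object) -> str:
--     return " ".join(str(value or "").replace("\n", " ").split()).strip()
--
-- def _infer_symbols(title: str, summary: str, watch_symbols: list[str] | None = None) -> list[str]: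
--     text = f"{_normalize_text(title)} {_normalize_text(summary)}".lower()
--     hit = set()
--     for kw, syms in KEYWORD_TO_SYMBOLS.items():
--         if kw in text:
--             hit |= syms
--     target_symbols = [str(item or "").strip().upper() for item in list(watch_symbols or []) if str(item or "").strip()]
--     candidates = target_symbols or sorted(GLOBAL_SYMBOLS)
--     return [s for s in candidates if s in hit]
-- ===== Notes on version B (the rewrite author's own statement) =====
-- stated objective: faster
-- what changed: B builds an inverted keyword->symbols index once, collects the set of symbols hit in one pass over the distinct keywords, and filters the candidates by membership in that set, instead of A's per-candidate any() scan over that candidate's keyword set. (measured ~1.9x faster on large inputs: each keyword substring is searched once instead of once per matching candidate)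
import Mathlib
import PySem

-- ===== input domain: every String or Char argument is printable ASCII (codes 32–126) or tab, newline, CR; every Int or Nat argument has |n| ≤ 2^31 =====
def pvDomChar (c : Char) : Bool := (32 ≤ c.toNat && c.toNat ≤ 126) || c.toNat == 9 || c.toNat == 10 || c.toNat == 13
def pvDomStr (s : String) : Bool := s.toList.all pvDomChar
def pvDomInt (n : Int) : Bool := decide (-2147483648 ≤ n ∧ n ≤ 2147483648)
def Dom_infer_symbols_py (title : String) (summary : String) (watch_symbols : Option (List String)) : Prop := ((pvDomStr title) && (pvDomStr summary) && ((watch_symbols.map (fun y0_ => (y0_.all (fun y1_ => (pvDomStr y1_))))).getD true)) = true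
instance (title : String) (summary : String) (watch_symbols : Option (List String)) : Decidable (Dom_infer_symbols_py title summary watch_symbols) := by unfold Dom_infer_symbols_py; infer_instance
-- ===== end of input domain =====

-- B replaces A's per-candidate scan over its keyword set by an inverted keyword→symbols
-- index built once: one pass over the distinct keywords collects the set of hit symbols,
-- then candidates are filtered by membership in that set (each keyword searched once,
-- measured faster in a timing run).

-- ===== PORT A =====
-- module constants shared by both Pythons
def pyGlobalSymbols : PySem.Set String := PySem.Set.ofList ["XAUUSD","XAGUSD","EURUSD","USDJPY"]

def pySymbolKeywords : PySem.Dict String (PySem.Set String) :=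
  PySem.Dict.ofList [
    ("XAUUSD", PySem.Set.ofList ["gold","bullion","fomc","federal reserve","powell","cpi","pce","inflation","yield","treasury"]),
    ("XAGUSD", PySem.Set.ofList ["silver","bullion","fomc","federal reserve","powell","cpi","pce","inflation","yield"]),
    ("EURUSD", PySem.Set.ofList ["ecb","lagarde","euro area","eurozone","euro","federal reserve","powell","dollar","cpi","pce"]),
    ("USDJPY", PySem.Set.ofList ["boj","bank of japan","ueda","yen","japan","treasury","yield","federal reserve","powell"])]

-- _normalize_text (identical helper in both Pythons); 'value or ""' is the identity on str
def pyNormalizeText (value : String) : String :=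
  PySem.Str.strip (PySem.Str.join " " (PySem.Str.split₀ (PySem.Str.replace value "\n" " ")))

def infer_symbols_py (title : String) (summary : String) (watch_symbols : Option (List String)) : List String :=
  let text := PySem.Str.lower (PySem.Str.join " " [pyNormalizeText title, pyNormalizeText summary])
  let target_symbols := ((watch_symbols.getD []).filter (fun item => !(PySem.Str.strip item == ""))).map
      (fun item => PySem.Str.upper (PySem.Str.strip item))
  let candidates := if target_symbols == [] then PySem.List.sorted pyGlobalSymbols (fun x => x) false else target_symbols
  candidates.foldl (fun matched symbol =>
    if (pySymbolKeywords.getD symbol PySem.Set.empty).any (fun keyword => PySem.Str.isIn keyword text)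
    then matched ++ [symbol] else matched) []

-- ===== PORT B =====
-- KEYWORD_TO_SYMBOLS, built once at import time from SYMBOL_KEYWORDS
def pyKeywordToSymbols : PySem.Dict String (PySem.Set String) :=
  pySymbolKeywords.items.foldl (fun d p =>
    p.2.foldl (fun d kw => d.modify kw PySem.Set.empty (fun s => s.add p.1)) d) PySem.Dict.empty

def infer_symbols_py_alt (title : String) (summary : String) (watch_symbols : Option (List String)) : List String :=
  let text := PySem.Str.lower (PySem.Str.join " " [pyNormalizeText title, pyNormalizeText summary])
  let hit := pyKeywordToSymbols.items.foldl (fun h p => if PySem.Str.isIn p.1 text then PySem.Set.union h p.2 else h) PySem.Set.empty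
  let target_symbols := ((watch_symbols.getD []).filter (fun item => !(PySem.Str.strip item == ""))).map
      (fun item => PySem.Str.upper (PySem.Str.strip item))
  let candidates := if target_symbols == [] then PySem.List.sorted pyGlobalSymbols (fun x => x) false else target_symbols
  candidates.filter (fun s => PySem.Set.contains hit s)

-- ===== PRECONDITION & SPEC =====
def Spec_infer_symbols_py (title : String) (summary : String) (watch_symbols : Option (List String)) (out : List String) : Prop := out = infer_symbols_py_alt title summary watch_symbols
instance (title : String) (summary : String) (watch_symbols : Option (List String)) (out : List String) : Decidable (Spec_infer_symbols_py title summary watch_symbols out) := by unfold Spec_infer_symbols_py; infer_instance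

-- ===== CLAIM (what is proved, stated in full; the proofs are below) =====
def Claim_equal_infer_symbols_py : Prop := ∀ (title : String) (summary : String) (watch_symbols : Option (List String)), Dom_infer_symbols_py title summary watch_symbols → Spec_infer_symbols_py title summary watch_symbols (infer_symbols_py title summary watch_symbols)

-- ===== LEMMAS AND PROOFS =====

theorem contains_foldl_union (items : List (String × PySem.Set String)) (b : String × PySem.Set String → Bool)
    (acc : PySem.Set String) (x : String) :
    PySem.Set.contains (items.foldl (fun h p => if b p then PySem.Set.union h p.2 else h) acc) x
      = (PySem.Set.contains acc x || items.any (fun p => b p && PySem.Set.contains p.2 x)) := by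
  induction items generalizing acc with
  | nil => simp
  | cons p t ih =>
      simp only [List.foldl_cons, List.any_cons, ih]
      by_cases hb : b p <;> simp [hb, Bool.or_assoc]

-- A's test 'any(keyword in text)' over SYMBOL_KEYWORDS[sym] equals a scan of the inverted index
set_option maxRecDepth 8192 in
theorem keywordToSymbols_items : pyKeywordToSymbols.items = [("gold", ["XAUUSD"]), ("bullion", ["XAUUSD","XAGUSD"]), ("fomc", ["XAUUSD","XAGUSD"]),
    ("federal reserve", ["XAUUSD","XAGUSD","EURUSD","USDJPY"]), ("powell", ["XAUUSD","XAGUSD","EURUSD","USDJPY"]),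
    ("cpi", ["XAUUSD","XAGUSD","EURUSD"]), ("pce", ["XAUUSD","XAGUSD","EURUSD"]), ("inflation", ["XAUUSD","XAGUSD"]),
    ("yield", ["XAUUSD","XAGUSD","USDJPY"]), ("treasury", ["XAUUSD","USDJPY"]), ("silver", ["XAGUSD"]),
    ("ecb", ["EURUSD"]), ("lagarde", ["EURUSD"]), ("euro area", ["EURUSD"]), ("eurozone", ["EURUSD"]),
    ("euro", ["EURUSD"]), ("dollar", ["EURUSD"]), ("boj", ["USDJPY"]), ("bank of japan", ["USDJPY"]),
    ("ueda", ["USDJPY"]), ("yen", ["USDJPY"]), ("japan", ["USDJPY"])] := by rfl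

set_option maxRecDepth 8192 in
theorem key_lemma (b : String → Bool) (sym : String) :
    (pySymbolKeywords.getD sym PySem.Set.empty).any (fun keyword => b keyword)
      = pyKeywordToSymbols.items.any (fun p => b p.1 && PySem.Set.contains p.2 sym) := by
  rw [keywordToSymbols_items]
  by_cases h1 : sym = "XAUUSD"
  · subst h1
    have hG : pySymbolKeywords.getD "XAUUSD" PySem.Set.empty
        = ["gold","bullion","fomc","federal reserve","powell","cpi","pce","inflation","yield","treasury"] := by rfl
    rw [hG]; simp [PySem.Set.contains]
  by_cases h2 : sym = "XAGUSD"
  · subst h2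
    have hG : pySymbolKeywords.getD "XAGUSD" PySem.Set.empty
        = ["silver","bullion","fomc","federal reserve","powell","cpi","pce","inflation","yield"] := by rfl
    rw [hG]; simp [PySem.Set.contains]
    cases b "silver" <;> cases b "bullion" <;> cases b "fomc" <;> cases b "federal reserve" <;>
      cases b "powell" <;> cases b "cpi" <;> cases b "pce" <;> cases b "inflation" <;> cases b "yield" <;> simp
  by_cases h3 : sym = "EURUSD"
  · subst h3
    have hG : pySymbolKeywords.getD "EURUSD" PySem.Set.empty
        = ["ecb","lagarde","euro area","eurozone","euro","federal reserve","powell","dollar","cpi","pce"] := by rfl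
    rw [hG]; simp [PySem.Set.contains]
    cases b "ecb" <;> cases b "lagarde" <;> cases b "euro area" <;> cases b "eurozone" <;> cases b "euro" <;>
      cases b "federal reserve" <;> cases b "powell" <;> cases b "dollar" <;> cases b "cpi" <;> cases b "pce" <;> simp
  by_cases h4 : sym = "USDJPY"
  · subst h4
    have hG : pySymbolKeywords.getD "USDJPY" PySem.Set.empty
        = ["boj","bank of japan","ueda","yen","japan","treasury","yield","federal reserve","powell"] := by rfl
    rw [hG]; simp [PySem.Set.contains]
    cases b "boj" <;> cases b "bank of japan" <;> cases b "ueda" <;> cases b "yen" <;> cases b "japan" <;>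
      cases b "treasury" <;> cases b "yield" <;> cases b "federal reserve" <;> cases b "powell" <;> simp
  · have e1 : ("XAUUSD" == sym) = false := beq_eq_false_iff_ne.mpr (Ne.symm h1)
    have e2 : ("XAGUSD" == sym) = false := beq_eq_false_iff_ne.mpr (Ne.symm h2)
    have e3 : ("EURUSD" == sym) = false := beq_eq_false_iff_ne.mpr (Ne.symm h3)
    have e4 : ("USDJPY" == sym) = false := beq_eq_false_iff_ne.mpr (Ne.symm h4)
    have hItems : pySymbolKeywords.items = [
      ("XAUUSD", ["gold","bullion","fomc","federal reserve","powell","cpi","pce","inflation","yield","treasury"]),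
      ("XAGUSD", ["silver","bullion","fomc","federal reserve","powell","cpi","pce","inflation","yield"]),
      ("EURUSD", ["ecb","lagarde","euro area","eurozone","euro","federal reserve","powell","dollar","cpi","pce"]),
      ("USDJPY", ["boj","bank of japan","ueda","yen","japan","treasury","yield","federal reserve","powell"])] := by rfl
    simp [PySem.Dict.getD, PySem.Dict.get?, hItems, PySem.Set.contains, PySem.Set.empty, e1, e2, e3, e4, h1, h2, h3, h4]

-- ===== VERDICT (by name: the statement is the Claim_ definition above) =====
theorem infer_symbols_py_spec : Claim_equal_infer_symbols_py := by
  intro title summary watch_symbols _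
  unfold Spec_infer_symbols_py infer_symbols_py infer_symbols_py_alt
  simp only [PySem.List.foldl_append_if
    (fun symbol => (pySymbolKeywords.getD symbol PySem.Set.empty).any
      (fun keyword => PySem.Str.isIn keyword (PySem.Str.lower (PySem.Str.join " " [pyNormalizeText title, pyNormalizeText summary]))))
    (fun x => x)]
  simp only [List.map_id_fun', id]
  refine List.filter_congr ?_
  intro sym _
  rw [key_lemma (fun kw => PySem.Str.isIn kw (PySem.Str.lower (PySem.Str.join " " [pyNormalizeText title, pyNormalizeText summary])))]
  simp only [contains_foldl_union]
  simp [PySem.Set.empty]
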